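-- pv_equiv track=rewrite | github.com/daniel-reich/turbo-robot | covbapJ32obi9PuSy_22.py | diamond_arrays
-- ===== SOURCE A (Python) =====
-- def diamond_arrays(x):
--   if x == 1:
--     return [[1]]
--   output = []
--   for i in range(1, x + 1):
--     row = []
--     while len(row) < i:
--       row.append(i)
--     output.append(row)
--   for i in range(x-1, 0, -1):
--     row = []
--     while len(row) < i:
--       row.append(i)
--     output.append(row)
--   return output
-- ===== SOURCE B (Python) =====
-- def diamond_arrays(x):
--   rows = []
--   for j in range(2 * x - 1):
--     v = x - abs(x - 1 - j)
--     rows.append([v] * v)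
--   return rows
-- ===== Notes on version B (the rewrite author's own statement) =====
-- stated objective: alternative
-- what changed: Replaces A's two staged build-up/build-down loops (with inner while-append row building and an x==1 guard) by one pass over all output row indices j, computing each row's width directly by the closed formula v = x - abs(x-1-j).
import Mathlib
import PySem

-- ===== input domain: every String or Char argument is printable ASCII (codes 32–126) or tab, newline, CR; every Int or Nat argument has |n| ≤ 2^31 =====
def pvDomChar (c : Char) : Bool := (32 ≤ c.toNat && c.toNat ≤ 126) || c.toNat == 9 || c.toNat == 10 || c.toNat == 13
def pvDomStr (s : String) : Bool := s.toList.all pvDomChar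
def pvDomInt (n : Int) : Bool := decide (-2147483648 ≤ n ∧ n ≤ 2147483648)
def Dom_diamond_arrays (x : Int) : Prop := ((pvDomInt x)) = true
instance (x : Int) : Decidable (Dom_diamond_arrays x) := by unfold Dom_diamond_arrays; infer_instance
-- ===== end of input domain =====

-- B replaces A's two staged build-up/build-down loops (with inner while-append row building and
-- an x==1 guard) by one pass over all output row indices j, computing each row's width by the
-- closed formula v = x - abs(x-1-j); objective: alternative.


-- ===== PORT A =====
-- the 'while len(row) < i: row.append(i)' loop
def pvRowA (i : Int) (row : List Int) : List Int :=
  if row.length < i then pvRowA i (row ++ [i]) else row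
termination_by (i - row.length).toNat
decreasing_by simp [List.length_append]; omega

def diamond_arrays (x : Int) : List (List Int) :=
  if x == 1 then [[1]]
  else
    let output : List (List Int) :=
      (PySem.List.pyRange 1 (x + 1) 1).foldl (fun output i => output ++ [pvRowA i []]) []
    (PySem.List.pyRange (x - 1) 0 (-1)).foldl (fun output i => output ++ [pvRowA i []]) output

-- ===== PORT B =====
def diamond_arrays_alt (x : Int) : List (List Int) :=
  (PySem.List.pyRange 0 (2 * x - 1) 1).foldl
    (fun rows j =>
      let v := x - |x - 1 - j|
      rows ++ [List.replicate v.toNat v]) []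

-- ===== PRECONDITION & SPEC =====
def Spec_diamond_arrays (x : Int) (out : List (List Int)) : Prop := out = diamond_arrays_alt x
instance (x : Int) (out : List (List Int)) : Decidable (Spec_diamond_arrays x out) := by unfold Spec_diamond_arrays; infer_instance

-- ===== CLAIM (what is proved, stated in full; the proofs are below) =====
def Claim_equal_diamond_arrays : Prop := ∀ (x : Int), Dom_diamond_arrays x → Spec_diamond_arrays x (diamond_arrays x)

-- ===== LEMMAS AND PROOFS =====

-- the while-loop builds row up to length i with value i
lemma pvRowA_eq (i : Int) (row : List Int) :
    pvRowA i row = row ++ List.replicate (i.toNat - row.length) i := by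
  fun_induction pvRowA i row with
  | case1 row h ih =>
      rw [ih]
      have hk : i.toNat - row.length = (i.toNat - (row ++ [i]).length) + 1 := by
        simp [List.length_append]; omega
      rw [hk, List.replicate_succ, List.append_assoc]
      simp
  | case2 row h =>
      have : i.toNat - row.length = 0 := by omega
      simp [this]

lemma pvRowA_nil (i : Int) : pvRowA i [] = List.replicate i.toNat i := by
  simpa using pvRowA_eq i []

-- ===== VERDICT (by name: the statement is the Claim_ definition above) =====
theorem diamond_arrays_spec : Claim_equal_diamond_arrays := by
  intro x _
  show diamond_arrays x = diamond_arrays_alt x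
  by_cases hx1 : x = 1
  · subst hx1; decide
  · unfold diamond_arrays diamond_arrays_alt
    rw [if_neg (by simpa using hx1)]
    simp only [PySem.List.foldl_append_singleton_eq_map, List.nil_append]
    by_cases hx : 1 ≤ x
    · -- x ≥ 2 here
      have hn : ((x.toNat : Int)) = x := Int.toNat_of_nonneg (by omega)
      rw [PySem.List.pyRange_one 1 (x + 1), PySem.List.pyRange_neg_one (x - 1) 0,
          PySem.List.pyRange_one 0 (2 * x - 1)]
      have h1 : (x + 1 - 1).toNat = x.toNat := by omega
      have h2 : (x - 1 - 0).toNat = x.toNat - 1 := by omega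
      have h3 : (2 * x - 1 - 0).toNat = x.toNat + (x.toNat - 1) := by omega
      rw [h1, h2, h3, List.range_add, List.map_append, List.map_append,
          List.map_map, List.map_map, List.map_map, List.map_map]
      congr 1
      · apply List.map_congr_left
        intro k hk
        have hk' : k < x.toNat := List.mem_range.mp hk
        simp only [Function.comp_apply]
        have ha : |x - 1 - (0 + (k : Int))| = x - 1 - (0 + (k : Int)) :=
          abs_of_nonneg (by omega)
        rw [pvRowA_nil, ha]
        have hv : x - (x - 1 - (0 + (k : Int))) = 1 + (k : Int) := by ring
        rw [hv]
      · rw [List.map_map]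
        apply List.map_congr_left
        intro k hk
        have hk' : k < x.toNat - 1 := List.mem_range.mp hk
        simp only [Function.comp_apply]
        have ha : |x - 1 - (0 + ((x.toNat + k : Nat) : Int))|
            = -(x - 1 - (0 + ((x.toNat + k : Nat) : Int))) :=
          abs_of_nonpos (by push_cast; omega)
        rw [pvRowA_nil, ha]
        have hv : x - -(x - 1 - (0 + ((x.toNat + k : Nat) : Int))) = x - 1 - (k : Int) := by
          push_cast; omega
        rw [hv]
    · -- x ≤ 0: every range is empty
      rw [PySem.List.pyRange_one_eq_nil (by omega : x + 1 ≤ 1),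
          PySem.List.pyRange_neg_one_eq_nil (by omega : x - 1 ≤ 0),
          PySem.List.pyRange_one_eq_nil (by omega : 2 * x - 1 ≤ 0)]
      simp
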